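-- pv_equiv track=rewrite | github.com/GregorioFornetti/CriPython | Cifras/bases_numericas.py | verificar_num_bin
-- ===== SOURCE A (Python) =====
-- def verificar_num_bin(numero_binario):
--     if not numero_binario:
--         return False
--
--     lista_binario = ['0', '1']
--     for digito_binario in numero_binario:
--         if digito_binario not in lista_binario:
--             return False
--     return True
-- ===== SOURCE B (Python) =====
-- def verificar_num_bin(numero_binario):
--     zeros = sum(1 for c in numero_binario if c == '0')
--     ones = sum(1 for c in numero_binario if c == '1')
--     return len(numero_binario) != 0 and zeros + ones == len(numero_binario)
-- ===== Notes on version B (the rewrite author's own statement) =====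
-- stated objective: alternative
-- what changed: replaced A's early-exit membership scan by an arithmetic characterization: count the '0's and the '1's in two counting passes and accept iff the input is non-empty and the two counts sum to its length
import Mathlib
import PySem

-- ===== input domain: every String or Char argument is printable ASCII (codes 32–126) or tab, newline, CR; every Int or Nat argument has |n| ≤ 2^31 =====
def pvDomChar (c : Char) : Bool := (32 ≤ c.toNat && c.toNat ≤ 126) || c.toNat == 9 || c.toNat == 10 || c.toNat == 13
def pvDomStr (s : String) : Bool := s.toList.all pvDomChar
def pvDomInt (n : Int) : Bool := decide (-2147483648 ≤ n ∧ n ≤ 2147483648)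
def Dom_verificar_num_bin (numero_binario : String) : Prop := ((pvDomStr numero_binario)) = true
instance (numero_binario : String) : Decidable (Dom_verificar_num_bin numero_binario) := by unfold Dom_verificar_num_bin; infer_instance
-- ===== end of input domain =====

-- B replaces A's early-exit membership scan by two counting passes (number of '0's, number of '1's) plus an arithmetic length comparison; same O(n) cost, different decomposition.


-- ===== PORT A =====
-- the 'for digito_binario in numero_binario' loop with early return False
def pvLoopA : List Char → Bool
  | [] => true
  | c :: rest => if !(['0', '1'].contains c) then false else pvLoopA rest

def verificar_num_bin (numero_binario : String) : Bool :=
  if numero_binario.toList.isEmpty then false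
  else pvLoopA numero_binario.toList

-- ===== PORT B =====
-- sum(1 for c in numero_binario if c == v)
def pvCountB (v : Char) (l : List Char) : Int :=
  l.foldl (fun acc c => if c == v then acc + 1 else acc) 0

def verificar_num_bin_alt (numero_binario : String) : Bool :=
  let zeros := pvCountB '0' numero_binario.toList
  let ones := pvCountB '1' numero_binario.toList
  !((numero_binario.toList.length : Int) == 0) &&
    (zeros + ones == (numero_binario.toList.length : Int))

-- ===== PRECONDITION & SPEC =====
def Spec_verificar_num_bin (numero_binario : String) (out : Bool) : Prop := out = verificar_num_bin_alt numero_binario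
instance (numero_binario : String) (out : Bool) : Decidable (Spec_verificar_num_bin numero_binario out) := by unfold Spec_verificar_num_bin; infer_instance

-- ===== CLAIM (what is proved, stated in full; the proofs are below) =====
def Claim_equal_verificar_num_bin : Prop := ∀ (numero_binario : String), Dom_verificar_num_bin numero_binario → Spec_verificar_num_bin numero_binario (verificar_num_bin numero_binario)

-- ===== LEMMAS AND PROOFS =====
theorem pvCounts_le (l : List Char) : l.count '0' + l.count '1' ≤ l.length := by
  induction l with
  | nil => simp
  | cons c rest ih =>
    simp only [List.count_cons, List.length_cons]
    by_cases hc0 : c = '0' <;> by_cases hc1 : c = '1' <;> simp_all <;> omega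

theorem pvCountB_eq_count (v : Char) (l : List Char) :
    pvCountB v l = (l.count v : Int) := by
  unfold pvCountB
  simpa using PySem.List.foldl_beq_add_one (l := l) (v := v) (a := (0 : Int))

theorem pvLoopA_eq_counts (l : List Char) :
    pvLoopA l = ((l.count '0' + l.count '1' : Int) == (l.length : Int)) := by
  induction l with
  | nil => rfl
  | cons c rest ih =>
    have h0 : rest.count '0' + rest.count '1' ≤ rest.length := pvCounts_le rest
    simp only [pvLoopA, ih, List.count_cons, List.length_cons, List.contains_cons,
      List.contains_nil]
    by_cases hc0 : c = '0'
    · simp [hc0]; constructor <;> intro h <;> omega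
    · by_cases hc1 : c = '1'
      · simp [hc1]; constructor <;> intro h <;> omega
      · rw [if_pos (by simp [hc0, hc1])]
        symm
        rw [beq_eq_false_iff_ne]
        simp [hc0, hc1]
        omega

-- ===== VERDICT (by name: the statement is the Claim_ definition above) =====
theorem verificar_num_bin_spec : Claim_equal_verificar_num_bin := by
  intro s _
  unfold Spec_verificar_num_bin verificar_num_bin verificar_num_bin_alt
  rw [pvLoopA_eq_counts, pvCountB_eq_count, pvCountB_eq_count]
  cases h : s.toList.isEmpty
  · simp_all
  · simp_all
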